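-- pv_equiv track=rewrite | github.com/DKapture/libdkapture | script/patch_skel.py | ensure_includes
-- ===== SOURCE A (Python) =====
-- INCLUDES_TO_ENSURE = [
--     "#include <sys/types.h>",
--     "#include <sys/stat.h>",
--     "#include <sys/mman.h>",
--     "#include <fcntl.h>",
--     "#include <unistd.h>",
-- ]
--
-- def ensure_includes(src: str) -> str:
--     """Ensure the required system includes are present. Insert them after the last
--     existing #include line near the top of the file.
--     """
--     lines = src.splitlines(keepends=True)
--     present = set()
--     last_include_idx = -1
--     for idx, line in enumerate(lines):
--         if line.lstrip().startswith('#include '):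
--             last_include_idx = idx
--             present.add(line.strip())
--         # Stop scanning includes if we reach a non-include after includes start
--         elif last_include_idx != -1 and line.strip() and not line.strip().startswith('#'):
--             break
--
--     missing = [inc for inc in INCLUDES_TO_ENSURE if inc not in present]
--     if not missing:
--         return src
--
--     insertion = ''.join(inc + "\n" for inc in missing)
--     if last_include_idx == -1:
--         # Insert after the header guard and any initial comments; default to start
--         return insertion + src
--     else:
--         insert_pos = 0
--         for i in range(last_include_idx + 1):
--             insert_pos += len(lines[i])
--         return src[:insert_pos] + insertion + src[insert_pos:]
-- ===== SOURCE B (Python) =====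
-- INCLUDES_TO_ENSURE = [
--     "#include <sys/types.h>",
--     "#include <sys/stat.h>",
--     "#include <sys/mman.h>",
--     "#include <fcntl.h>",
--     "#include <unistd.h>",
-- ]
--
--
-- def _is_inc(line):
--     return line.lstrip().startswith('#include ')
--
--
-- def _is_stop(line):
--     s = line.strip()
--     return s != '' and not s.startswith('#')
--
--
-- def _takewhile(pred, items):
--     out = []
--     for x in items:
--         if not pred(x):
--             break
--         out.append(x)
--     return out
--
--
-- def _dropwhile(pred, items):
--     n = 0
--     while n < len(items) and pred(items[n]):
--         n += 1
--     return items[n:]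
--
--
-- def ensure_includes(src: str) -> str:
--     """Ensure the required system includes are present. Insert them after the last
--     existing #include line near the top of the file.
--
--     List-splitting reformulation: split the line list into head ++ tail at the
--     insertion point, collect the includes of the contiguous scan region, and
--     rebuild the output by joining the pieces.
--     """
--     lines = src.splitlines(keepends=True)
--     if any(_is_inc(l) for l in lines):
--         pre = _takewhile(lambda l: not _is_inc(l), lines)      # before first include
--         region = _takewhile(lambda l: not _is_stop(l), lines[len(pre):])
--         keep = _dropwhile(lambda l: not _is_inc(l), region[::-1])[::-1]
--         head = pre + keep                                      # ends at last include
--         present = {l.strip() for l in region if _is_inc(l)}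
--     else:
--         head, present = [], set()
--     tail = lines[len(head):]
--     missing = [inc for inc in INCLUDES_TO_ENSURE if inc not in present]
--     if not missing:
--         return src
--     return ''.join(head) + ''.join(inc + "\n" for inc in missing) + ''.join(tail)
-- ===== Notes on version B (the rewrite author's own statement) =====
-- stated objective: alternative
-- what changed: Replaces A's index-tracking scan (enumerate, last_include_idx, summed character offsets, string slicing) by an index-free list-splitting formulation: takewhile/dropwhile split the line list into head/region/tail, the insertion point is found by dropping trailing non-includes from the reversed region, and the output is rebuilt by joining list pieces instead of slicing the source string at a computed byte offset.
import Mathlib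
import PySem

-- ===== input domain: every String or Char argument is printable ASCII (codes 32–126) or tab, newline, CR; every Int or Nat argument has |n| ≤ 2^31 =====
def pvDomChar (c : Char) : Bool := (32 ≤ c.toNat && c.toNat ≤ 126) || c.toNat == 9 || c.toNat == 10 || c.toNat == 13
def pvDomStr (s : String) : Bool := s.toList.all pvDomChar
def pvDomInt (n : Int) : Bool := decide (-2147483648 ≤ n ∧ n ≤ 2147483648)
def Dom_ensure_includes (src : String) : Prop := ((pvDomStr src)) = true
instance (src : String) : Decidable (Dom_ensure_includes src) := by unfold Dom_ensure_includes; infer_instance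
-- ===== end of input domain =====

-- B replaces A's index/offset bookkeeping by an index-free split of the line list
-- (takewhile/dropwhile pieces joined back together); alternative decomposition, same cost.

-- ===== PORT A =====

-- src.splitlines(keepends=True), hand-ported (PySem.Str.splitlines drops the ends).
-- Exact on Dom_ensure_includes: there the only line breaks are '\n', '\r' and '\r\n'.
def pvSplitAux : List Char → List Char → List (List Char)
  | cur, [] => if cur.isEmpty then [] else [cur.reverse]
  | cur, '\n' :: r => (('\n' :: cur).reverse) :: pvSplitAux [] r
  | cur, '\r' :: '\n' :: r => (('\n' :: '\r' :: cur).reverse) :: pvSplitAux [] r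
  | cur, '\r' :: r => (('\r' :: cur).reverse) :: pvSplitAux [] r
  | cur, c :: r => pvSplitAux (c :: cur) r

def pvSplitKeep (cs : List Char) : List (List Char) := pvSplitAux [] cs

def pvIncludes : List (List Char) :=
  [ "#include <sys/types.h>".toList,
    "#include <sys/stat.h>".toList,
    "#include <sys/mman.h>".toList,
    "#include <fcntl.h>".toList,
    "#include <unistd.h>".toList ]

-- A's scanning loop: enumerate with present / last_include_idx state and break.
def pvScanA : List (List Char) → Nat → PySem.Set (List Char) → Int →
    PySem.Set (List Char) × Int
  | [], _, present, last => (present, last)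
  | line :: rest, idx, present, last =>
    if PySem.Chars.startswith (PySem.Chars.lstrip line) "#include ".toList then
      pvScanA rest (idx + 1) (PySem.Set.add present (PySem.Chars.strip line)) (idx : Int)
    else if last != -1 && !(PySem.Chars.strip line).isEmpty
        && !PySem.Chars.startswith (PySem.Chars.strip line) "#".toList then
      (present, last)    -- break
    else
      pvScanA rest (idx + 1) present last

def ensure_includes (src : String) : String :=
  let lines := pvSplitKeep src.toList
  let scan := pvScanA lines 0 PySem.Set.empty (-1)
  let present := scan.1
  let last := scan.2
  let missing := pvIncludes.filter (fun inc => !(PySem.Set.contains present inc))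
  if missing.isEmpty then src
  else
    let insertion := (missing.map (fun inc => inc ++ ['\n'])).flatten
    if last = -1 then String.ofList (insertion ++ src.toList)
    else
      let insertPos : Int := (PySem.List.pyRange 0 (last + 1) 1).foldl
        (fun acc i => acc + ((PySem.List.pyGetD lines i []).length : Int)) 0
      String.ofList (PySem.Chars.slice src.toList none (some insertPos)
        ++ insertion ++ PySem.Chars.slice src.toList (some insertPos) none)

-- ===== PORT B =====

def pvIsInc (line : List Char) : Bool :=
  PySem.Chars.startswith (PySem.Chars.lstrip line) "#include ".toList

def pvIsStop (line : List Char) : Bool :=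
  !(PySem.Chars.strip line).isEmpty
    && !PySem.Chars.startswith (PySem.Chars.strip line) "#".toList

-- Source B's _takewhile/_dropwhile are the standard takewhile/dropwhile loops, ported as
-- List.takeWhile / List.dropWhile; region[::-1] is List.reverse; lines[n:] is List.drop n.
def ensure_includes_alt (src : String) : String :=
  let lines := pvSplitKeep src.toList
  let hp :=
    if lines.any pvIsInc then
      let pre := lines.takeWhile (fun l => !pvIsInc l)
      let region := (lines.drop pre.length).takeWhile (fun l => !pvIsStop l)
      let keep := (region.reverse.dropWhile (fun l => !pvIsInc l)).reverse
      (pre ++ keep, PySem.Set.ofList ((region.filter pvIsInc).map PySem.Chars.strip))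
    else ([], PySem.Set.empty)
  let head := hp.1
  let tail := lines.drop head.length
  let missing := pvIncludes.filter (fun inc => !(PySem.Set.contains hp.2 inc))
  if missing.isEmpty then src
  else String.ofList (head.flatten
    ++ (missing.map (fun inc => inc ++ ['\n'])).flatten ++ tail.flatten)

-- ===== PRECONDITION & SPEC =====
def Spec_ensure_includes (src : String) (out : String) : Prop := out = ensure_includes_alt src
instance (src : String) (out : String) : Decidable (Spec_ensure_includes src out) := by unfold Spec_ensure_includes; infer_instance

-- ===== CLAIM (what is proved, stated in full; the proofs are below) =====
def Claim_equal_ensure_includes : Prop := ∀ (src : String), Dom_ensure_includes src → Spec_ensure_includes src (ensure_includes src)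

-- ===== LEMMAS AND PROOFS =====

-- splitlines(keepends=True) round-trips: joining the pieces gives back the source.
theorem pv_flatten_splitAux (l cur : List Char) :
    (pvSplitAux cur l).flatten = cur.reverse ++ l := by
  fun_induction pvSplitAux cur l <;> simp_all [List.isEmpty_iff]

theorem pv_flatten_splitKeep (cs : List Char) : (pvSplitKeep cs).flatten = cs := by
  simpa [pvSplitKeep] using pv_flatten_splitAux cs []

theorem pv_rstrip_cons (c : Char) (hc : PySem.Chars.isspace c = false) (s : List Char) :
    PySem.Chars.rstrip (c :: s) = c :: PySem.Chars.rstrip s := by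
  simp only [PySem.Chars.rstrip, List.reverse_cons, List.dropWhile_append]
  by_cases h : (List.dropWhile PySem.Chars.isspace s.reverse).isEmpty
  · simp [h, List.dropWhile, hc, List.isEmpty_iff.mp h]
  · simp [h, List.reverse_append]

-- a '#include ' line strips to a string starting with '#', hence is never a stop line
theorem pv_isInc_not_isStop {l : List Char} (h : pvIsInc l = true) : pvIsStop l = false := by
  have h' : ("#include ".toList).isPrefixOf (PySem.Chars.lstrip l) = true := h
  obtain ⟨t, ht⟩ := List.isPrefixOf_iff_prefix.mp h'
  have hstrip : PySem.Chars.strip l = '#' :: PySem.Chars.rstrip ("include ".toList ++ t) := by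
    have h1 : PySem.Chars.strip l = PySem.Chars.rstrip (PySem.Chars.lstrip l) := rfl
    rw [h1, ← ht]
    have h2 : ("#include ".toList : List Char) ++ t = '#' :: ("include ".toList ++ t) := rfl
    rw [h2, pv_rstrip_cons '#' (by decide)]
  simp [pvIsStop, hstrip, PySem.Chars.startswith, List.isPrefixOf]

-- A's break test is (last != -1) && (this is a stop line)
theorem pv_condA (j : Int) (l : List Char) :
    (j != -1 && !(PySem.Chars.strip l).isEmpty
      && !PySem.Chars.startswith (PySem.Chars.strip l) "#".toList)
    = ((j != -1) && pvIsStop l) := by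
  rw [Bool.and_assoc]; rfl

-- peeling one element off the reversed-dropWhile-reversed ("drop trailing") operation
theorem pv_keep_cons (l : List Char) (t : List (List Char)) (q : List Char → Bool) :
    (((l :: t).reverse.dropWhile q).reverse) =
      if q l && (t.reverse.dropWhile q).reverse.isEmpty then []
      else l :: (t.reverse.dropWhile q).reverse := by
  rw [List.reverse_cons, List.dropWhile_append]
  by_cases h : (List.dropWhile q t.reverse).isEmpty
  · rw [if_pos h]
    have h0 : List.dropWhile q t.reverse = [] := List.isEmpty_iff.mp h
    by_cases hq : q l
    · rw [if_pos (by simp [hq, h0])]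
      simp [List.dropWhile, hq]
    · rw [if_neg (by simp [hq])]
      simp [List.dropWhile, hq, h0]
  · have h0 : List.dropWhile q t.reverse ≠ [] := by simpa [List.isEmpty_iff] using h
    rw [if_neg h, if_neg (by simp [List.isEmpty_iff, h0]), List.reverse_append]
    simp

-- the "drop trailing" result is a prefix: region = keep ++ (dropped trailing part)
theorem pv_keep_split (region : List (List Char)) (q : List Char → Bool) :
    region = (region.reverse.dropWhile q).reverse ++ (region.reverse.takeWhile q).reverse := by
  conv_rhs => rw [← List.reverse_append, List.takeWhile_append_dropWhile, List.reverse_reverse]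

theorem pv_drop_takeWhile_length {α : Type} (l : List α) (p : α → Bool) :
    l.drop (l.takeWhile p).length = l.dropWhile p := by
  induction l with
  | nil => simp
  | cons a t ih => by_cases h : p a <;> simp [h, ih]

-- phase 2 of A's loop (an include has been seen: last = j ≥ 0), characterised by
-- B's region/keep decomposition of the remaining lines
theorem pv_scanA_pos (lines : List (List Char)) (i : Nat) (p : PySem.Set (List Char))
    (j : Int) (hj : 0 ≤ j) :
    pvScanA lines i p j =
      ((((lines.takeWhile (fun l => !pvIsStop l)).filter pvIsInc).map
          PySem.Chars.strip).foldl PySem.Set.add p,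
        if ((lines.takeWhile (fun l => !pvIsStop l)).reverse.dropWhile
              (fun l => !pvIsInc l)).reverse.isEmpty then j
        else (i : Int) +
          ((lines.takeWhile (fun l => !pvIsStop l)).reverse.dropWhile
              (fun l => !pvIsInc l)).reverse.length - 1) := by
  induction lines generalizing i p j with
  | nil => simp [pvScanA]
  | cons l r ih =>
    have hIdef : PySem.Chars.startswith (PySem.Chars.lstrip l) "#include ".toList
        = pvIsInc l := rfl
    rw [pvScanA, pv_condA, hIdef]
    by_cases hInc : pvIsInc l
    · have hStop := pv_isInc_not_isStop hInc
      rw [if_pos hInc, ih (i + 1) _ (i : Int) (Int.natCast_nonneg i)]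
      rw [List.takeWhile_cons_of_pos (p := fun l => !pvIsStop l) (by simp [hStop])]
      rw [pv_keep_cons l (r.takeWhile (fun l => !pvIsStop l)) (fun l => !pvIsInc l)]
      rw [List.filter_cons_of_pos hInc, List.map_cons, List.foldl_cons]
      have hcf : (!pvIsInc l && ((r.takeWhile (fun l => !pvIsStop l)).reverse.dropWhile
          (fun l => !pvIsInc l)).reverse.isEmpty) = false := by simp [hInc]
      rw [hcf, if_neg (show ¬((false : Bool) = true) by simp)]
      refine Prod.ext rfl ?_
      set keepr := ((r.takeWhile (fun l => !pvIsStop l)).reverse.dropWhile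
        (fun l => !pvIsInc l)).reverse with hke
      clear_value keepr
      rcases keepr with _ | ⟨k0, ks⟩ <;> simp <;> push_cast <;> omega
    · rw [if_neg hInc]
      by_cases hStop : pvIsStop l
      · have hj' : (j != -1) = true := by simp; omega
        rw [if_pos (by simp [hj', hStop])]
        rw [List.takeWhile_cons_of_neg (p := fun l => !pvIsStop l) (by simp [hStop])]
        simp
      · rw [if_neg (by simp [hStop]), ih (i + 1) p j hj]
        rw [List.takeWhile_cons_of_pos (p := fun l => !pvIsStop l) (by simp [hStop])]
        rw [pv_keep_cons l (r.takeWhile (fun l => !pvIsStop l)) (fun l => !pvIsInc l)]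
        rw [List.filter_cons_of_neg (by simp [hInc])]
        have hq : (!pvIsInc l) = true := by simp [hInc]
        rw [hq, Bool.true_and]
        refine Prod.ext rfl ?_
        set keepr := ((r.takeWhile (fun l => !pvIsStop l)).reverse.dropWhile
          (fun l => !pvIsInc l)).reverse with hke
        clear_value keepr
        rcases keepr with _ | ⟨k0, ks⟩ <;> simp <;> push_cast <;> omega

-- the full loop, from the initial state (present = ∅, last = -1)
theorem pv_scanA_eq (lines : List (List Char)) (i : Nat) (p : PySem.Set (List Char)) :
    pvScanA lines i p (-1) =
      if lines.any pvIsInc then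
        (((((lines.dropWhile (fun l => !pvIsInc l)).takeWhile
              (fun l => !pvIsStop l)).filter pvIsInc).map
            PySem.Chars.strip).foldl PySem.Set.add p,
          (i : Int) + ((lines.takeWhile (fun l => !pvIsInc l)).length +
            (((lines.dropWhile (fun l => !pvIsInc l)).takeWhile
                (fun l => !pvIsStop l)).reverse.dropWhile
              (fun l => !pvIsInc l)).reverse.length) - 1)
      else (p, -1) := by
  induction lines generalizing i p with
  | nil => simp [pvScanA]
  | cons l r ih =>
    have hIdef : PySem.Chars.startswith (PySem.Chars.lstrip l) "#include ".toList
        = pvIsInc l := rfl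
    rw [pvScanA, pv_condA, hIdef]
    by_cases hInc : pvIsInc l
    · have hStop := pv_isInc_not_isStop hInc
      have hany : (l :: r).any pvIsInc = true := by simp [hInc]
      rw [if_pos hInc, if_pos hany]
      rw [pv_scanA_pos r (i + 1) _ (i : Int) (Int.natCast_nonneg i)]
      rw [List.dropWhile_cons_of_neg (p := fun l => !pvIsInc l) (by simp [hInc]),
        List.takeWhile_cons_of_neg (p := fun l => !pvIsInc l) (by simp [hInc]),
        List.takeWhile_cons_of_pos (p := fun l => !pvIsStop l) (by simp [hStop])]
      rw [pv_keep_cons l (r.takeWhile (fun l => !pvIsStop l)) (fun l => !pvIsInc l)]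
      rw [List.filter_cons_of_pos hInc, List.map_cons, List.foldl_cons]
      have hcf : (!pvIsInc l && ((r.takeWhile (fun l => !pvIsStop l)).reverse.dropWhile
          (fun l => !pvIsInc l)).reverse.isEmpty) = false := by simp [hInc]
      rw [hcf, if_neg (show ¬((false : Bool) = true) by simp)]
      refine Prod.ext rfl ?_
      set keepr := ((r.takeWhile (fun l => !pvIsStop l)).reverse.dropWhile
        (fun l => !pvIsInc l)).reverse with hke
      clear_value keepr
      rcases keepr with _ | ⟨k0, ks⟩ <;> simp <;> push_cast <;> omega
    · have hbm : ¬((((-1 : Int) != -1) && pvIsStop l) = true) := by simp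
      rw [if_neg hInc, if_neg hbm, ih (i + 1) p]
      rw [List.dropWhile_cons_of_pos (p := fun l => !pvIsInc l) (by simp [hInc]),
        List.takeWhile_cons_of_pos (p := fun l => !pvIsInc l) (by simp [hInc])]
      by_cases han : r.any pvIsInc
      · have hany : (l :: r).any pvIsInc = true := by simp [han]
        rw [if_pos han, if_pos hany]
        refine Prod.ext rfl ?_
        simp only [List.length_cons]
        push_cast
        omega
      · have hany : ¬((l :: r).any pvIsInc = true) := by simp [han, hInc]
        rw [if_neg han, if_neg hany]

-- when some include exists, keep is nonempty (the region starts with an include line)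
theorem pv_keep_ne_nil (lines : List (List Char)) (h : lines.any pvIsInc = true) :
    (((lines.dropWhile (fun l => !pvIsInc l)).takeWhile
        (fun l => !pvIsStop l)).reverse.dropWhile (fun l => !pvIsInc l)).reverse ≠ [] := by
  induction lines with
  | nil => simp at h
  | cons l r ih =>
    by_cases hInc : pvIsInc l
    · have hStop := pv_isInc_not_isStop hInc
      rw [List.dropWhile_cons_of_neg (p := fun l => !pvIsInc l) (by simp [hInc]),
        List.takeWhile_cons_of_pos (p := fun l => !pvIsStop l) (by simp [hStop]),
        pv_keep_cons l (r.takeWhile (fun l => !pvIsStop l)) (fun l => !pvIsInc l)]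
      simp [hInc]
    · rw [List.dropWhile_cons_of_pos (p := fun l => !pvIsInc l) (by simp [hInc])]
      exact ih (by simpa [List.any_cons, hInc] using h)

-- A's offset loop sums the lengths of the first n lines
theorem pv_sumLen (lines : List (List Char)) (n : Nat) (hn : n ≤ lines.length) :
    (PySem.List.pyRange 0 (n : Int) 1).foldl
        (fun acc i => acc + ((PySem.List.pyGetD lines i []).length : Int)) 0
      = ((lines.take n).flatten.length : Int) := by
  revert hn
  induction n with
  | zero => intro _; simp [PySem.List.pyRange_one]
  | succ m ihm =>
    intro hn
    have hm : m < lines.length := hn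
    have hstep : PySem.List.pyRange 0 ((m + 1 : Nat) : Int) 1
        = PySem.List.pyRange 0 ((m : Nat) : Int) 1 ++ [((m : Nat) : Int)] := by
      simp [PySem.List.pyRange_one, List.range_succ]
    rw [hstep, List.foldl_append, ihm (Nat.le_of_lt hm)]
    simp only [List.foldl_cons, List.foldl_nil, PySem.List.pyGetD_natCast,
      List.getD_eq_getElem?_getD, List.getElem?_eq_getElem hm]
    rw [List.take_succ, List.getElem?_eq_getElem hm]
    simp
    rw [List.sum_take_succ _ m (by simpa using hm)]
    simp

-- ===== VERDICT (by name: the statement is the Claim_ definition above) =====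
theorem ensure_includes_spec : Claim_equal_ensure_includes := by
  unfold Claim_equal_ensure_includes Spec_ensure_includes
  intro src _
  simp only [ensure_includes, ensure_includes_alt]
  have hflat := pv_flatten_splitKeep src.toList
  set lines := pvSplitKeep src.toList with hlines
  rw [pv_scanA_eq lines 0 PySem.Set.empty]
  rw [pv_drop_takeWhile_length lines (fun l => !pvIsInc l)]
  by_cases han : lines.any pvIsInc
  · rw [if_pos han, if_pos han]
    dsimp only
    set pre := lines.takeWhile (fun l => !pvIsInc l) with hpre
    set region := (lines.dropWhile (fun l => !pvIsInc l)).takeWhile (fun l => !pvIsStop l)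
      with hregion
    set keep := (region.reverse.dropWhile (fun l => !pvIsInc l)).reverse with hkeep
    have hkne : keep ≠ [] := pv_keep_ne_nil lines han
    have hkpos : 0 < keep.length := List.length_pos_iff.mpr hkne
    have hsplit : lines = (pre ++ keep) ++
        ((region.reverse.takeWhile (fun l => !pvIsInc l)).reverse ++
          (lines.dropWhile (fun l => !pvIsInc l)).dropWhile (fun l => !pvIsStop l)) := by
      conv_lhs => rw [← List.takeWhile_append_dropWhile
        (p := fun l => !pvIsInc l) (l := lines)]
      rw [← hpre]
      conv_lhs => rw [← List.takeWhile_append_dropWhile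
        (p := fun l => !pvIsStop l) (l := lines.dropWhile (fun l => !pvIsInc l))]
      rw [← hregion]
      conv_lhs => rw [pv_keep_split region (fun l => !pvIsInc l)]
      rw [← hkeep, List.append_assoc, List.append_assoc]
    set rest := (region.reverse.takeWhile (fun l => !pvIsInc l)).reverse ++
      (lines.dropWhile (fun l => !pvIsInc l)).dropWhile (fun l => !pvIsStop l) with hrest
    simp only [PySem.Set.ofList_eq_foldl]
    have hempty : (PySem.Set.empty : PySem.Set (List Char)) = [] := rfl
    rw [hempty]
    by_cases hmiss : (pvIncludes.filter (fun inc =>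
        !(PySem.Set.contains (((region.filter pvIsInc).map PySem.Chars.strip).foldl
          PySem.Set.add []) inc))).isEmpty
    · rw [if_pos hmiss, if_pos hmiss]
    · rw [if_neg hmiss, if_neg hmiss]
      rw [if_neg (show ¬(((0 : Nat) : Int) + ((pre.length : Int) + (keep.length : Int)) - 1
          = -1) by push_cast; omega)]
      have hcut : ((0 : Nat) : Int) + ((pre.length : Int) + (keep.length : Int)) - 1 + 1
          = (((pre ++ keep).length : Nat) : Int) := by
        simp only [List.length_append]; push_cast; omega
      rw [hcut]
      have hle : (pre ++ keep).length ≤ lines.length := by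
        conv_rhs => rw [hsplit]
        simp [List.length_append]
      rw [pv_sumLen lines (pre ++ keep).length hle]
      have htake : lines.take (pre ++ keep).length = pre ++ keep := by
        conv_lhs => rw [hsplit]
        exact List.take_left
      have hdrop : lines.drop (pre ++ keep).length = rest := by
        conv_lhs => rw [hsplit]
        exact List.drop_left
      rw [htake, hdrop]
      have hsrc : src.toList = (pre ++ keep).flatten ++ rest.flatten := by
        rw [← hflat]
        conv_lhs => rw [hsplit]
        rw [List.flatten_append]
      rw [PySem.Chars.slice_eq_listSlice, PySem.Chars.slice_eq_listSlice,
        PySem.List.slice_to_natCast, PySem.List.slice_from_natCast]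
      rw [hsrc, List.take_left, List.drop_left]
  · rw [if_neg han, if_neg han]
    dsimp only
    by_cases hmiss : (pvIncludes.filter (fun inc =>
        !(PySem.Set.contains PySem.Set.empty inc))).isEmpty
    · rw [if_pos hmiss, if_pos hmiss]
    · rw [if_neg hmiss, if_neg hmiss, if_pos rfl]
      simp [hflat]
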